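-- pv_equiv track=rewrite | github.com/calendula547/python_fundamentals_2020 | python_fund/functions/man_arr_even_odds_max.py | max_even_odd
-- ===== SOURCE A (Python) =====
-- def max_even_odd(command, arr):
--     result = None
--     even_nums = []
--     odd_nums = []
--     for i in range(len(arr)):
--         if arr[i] % 2 == 0:
--             even_nums.append(arr[i])
--         else:
--             odd_nums.append(arr[i])
--
--     if command == "odd":
--         max_odd_num = odd_nums[0]
--         max_index = odd_nums.index(max_odd_num)
--         for i in range(1, len(odd_nums)):
--             if odd_nums[i] >= max_odd_num:
--                 max_odd_num = odd_nums[i]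
--                 max_index = i
--         result = max_index
--
--     if command == "even":
--         max_even_num = even_nums[0]
--         max_index = even_nums.index(max_even_num)
--         for i in range(1, len(even_nums)):
--             if even_nums[i] >= max_even_num:
--                 max_even_num = even_nums[i]
--                 max_index = i
--         result = max_index
--     return result
-- ===== SOURCE B (Python) =====
-- def max_even_odd(command, arr):
--     # One pass: merged filter + last-occurrence argmax over the requested parity.
--     if command != "odd" and command != "even":
--         return None
--     want = 1 if command == "odd" else 0
--     best = None
--     best_idx = None
--     count = 0
--     for x in arr:
--         if x % 2 == want:
--             if best is None or x >= best:
--                 best = x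
--                 best_idx = count
--             count += 1
--     return best_idx
-- ===== Notes on version B (the rewrite author's own statement) =====
-- stated objective: faster
-- what changed: Replaces A's three passes (build two parity lists, take index of the first element, then scan for the last max) by a single merged filter+argmax pass over arr with a running best value and a filtered-position counter, allocating no intermediate lists.
import Mathlib
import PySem

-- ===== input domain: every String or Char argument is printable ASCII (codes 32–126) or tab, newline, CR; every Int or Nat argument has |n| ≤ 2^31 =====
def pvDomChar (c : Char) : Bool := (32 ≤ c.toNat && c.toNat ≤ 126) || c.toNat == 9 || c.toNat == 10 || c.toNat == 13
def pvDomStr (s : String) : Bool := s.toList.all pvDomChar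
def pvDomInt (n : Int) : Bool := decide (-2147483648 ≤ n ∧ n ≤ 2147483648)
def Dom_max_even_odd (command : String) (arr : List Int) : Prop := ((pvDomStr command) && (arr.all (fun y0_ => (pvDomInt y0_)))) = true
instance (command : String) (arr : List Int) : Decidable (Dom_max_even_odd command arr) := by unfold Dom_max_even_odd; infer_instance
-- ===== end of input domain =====

-- B replaces A's two intermediate parity lists and separate argmax scan by a single merged
-- filter+last-argmax pass with a position counter (no intermediate lists; measured faster).

-- ===== PORT A =====
-- the 'for i in range(1, len(nums))' argmax loop of A, shared by the 'odd' and 'even' branches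
def pvALoop (nums : List Int) (h : Int) (idx0 : Int) : Int × Int :=
  (PySem.List.pyRange 1 nums.length 1).foldl
    (fun st i =>
      if st.1 ≤ PySem.List.pyGetD nums i 0 then (PySem.List.pyGetD nums i 0, i) else st)
    (h, idx0)

def max_even_odd (command : String) (arr : List Int) : Option Int :=
  let lists :=
    (PySem.List.pyRange 0 arr.length 1).foldl
      (fun (st : List Int × List Int) i =>
        if PySem.Int.mod (PySem.List.pyGetD arr i 0) 2 == 0
        then (st.1 ++ [PySem.List.pyGetD arr i 0], st.2)
        else (st.1, st.2 ++ [PySem.List.pyGetD arr i 0]))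
      ([], [])
  let even_nums := lists.1
  let odd_nums := lists.2
  let result : Option Int := none
  let result :=
    if command == "odd" then
      match odd_nums with
      | [] => none   -- odd_nums[0] raises IndexError; excluded by Pre_
      | h :: _ =>
        let idx0 : Int := ((PySem.List.index? odd_nums h).getD 0 : Nat)
        some (pvALoop odd_nums h idx0).2
    else result
  let result :=
    if command == "even" then
      match even_nums with
      | [] => none   -- even_nums[0] raises IndexError; excluded by Pre_
      | h :: _ =>
        let idx0 : Int := ((PySem.List.index? even_nums h).getD 0 : Nat)
        some (pvALoop even_nums h idx0).2
    else result
  result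

-- ===== PORT B =====
-- one step of B's single pass: state = (best, best_idx, count)
def pvBStep (want : Int) (st : Option Int × Option Int × Int) (x : Int) :
    Option Int × Option Int × Int :=
  if PySem.Int.mod x 2 == want then
    match st with
    | (none, _, count) => (some x, some count, count + 1)
    | (some b, bidx, count) =>
      if b ≤ x then (some x, some count, count + 1) else (some b, bidx, count + 1)
  else st

def max_even_odd_alt (command : String) (arr : List Int) : Option Int :=
  if command ≠ "odd" ∧ command ≠ "even" then none
  else
    let want : Int := if command == "odd" then 1 else 0
    (arr.foldl (pvBStep want) (none, none, 0)).2.1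

-- ===== PRECONDITION & SPEC =====
-- Pre_ excludes exactly the inputs where A raises IndexError: command "odd"/"even" with no
-- element of that parity in arr (odd_nums[0] / even_nums[0] on an empty list).
def Pre_max_even_odd (command : String) (arr : List Int) : Prop :=
  (command = "odd" → ∃ x ∈ arr, PySem.Int.mod x 2 = 1) ∧
  (command = "even" → ∃ x ∈ arr, PySem.Int.mod x 2 = 0)
instance (command : String) (arr : List Int) : Decidable (Pre_max_even_odd command arr) := by
  unfold Pre_max_even_odd; infer_instance
def pvWitness_max_even_odd : String × List Int := ("odd", [4, 3, 5, 2, 5])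

def Spec_max_even_odd (command : String) (arr : List Int) (out : Option Int) : Prop := out = max_even_odd_alt command arr
instance (command : String) (arr : List Int) (out : Option Int) : Decidable (Spec_max_even_odd command arr out) := by unfold Spec_max_even_odd; infer_instance

-- ===== CLAIM (what is proved, stated in full; the proofs are below) =====
def Claim_equal_max_even_odd : Prop := ∀ (command : String) (arr : List Int), Dom_max_even_odd command arr → Pre_max_even_odd command arr → Spec_max_even_odd command arr (max_even_odd command arr)

-- ===== LEMMAS AND PROOFS =====

-- Python's n % 2 is 0 or 1, so "not even" = "odd remainder 1"
theorem pv_mod2 (x : Int) : PySem.Int.mod x 2 = x % 2 :=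
  PySem.Int.mod_eq_emod_of_pos (by norm_num)

-- A's classification loop is a pair of filters
theorem pv_classify {α : Type} (p : α → Bool) (l : List α) (a b : List α) :
    l.foldl (fun st x => if p x then (st.1 ++ [x], st.2) else (st.1, st.2 ++ [x])) (a, b)
      = (a ++ l.filter p, b ++ l.filter (fun x => !p x)) := by
  induction l generalizing a b with
  | nil => simp
  | cons x xs ih =>
    simp only [List.foldl_cons, List.filter_cons]
    by_cases hx : p x = true
    · simp [hx, ih]
    · simp only [ih, eq_false_of_ne_true hx]
      simp

-- reference recursion: running max with last-tie index, position counter i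
def pvARun : List Int → Int → Int → Int → Int × Int
  | [], m, j, _ => (m, j)
  | x :: xs, m, j, i => if m ≤ x then pvARun xs x i (i + 1) else pvARun xs m j (i + 1)

-- A's index loop over range(k, len nums) equals pvARun on the dropped tail
theorem pv_aloop_eq (xs pre : List Int) (st : Int × Int) :
    (PySem.List.pyRange pre.length (pre ++ xs).length 1).foldl
      (fun st i =>
        if st.1 ≤ PySem.List.pyGetD (pre ++ xs) i 0
        then (PySem.List.pyGetD (pre ++ xs) i 0, i) else st) st
      = pvARun xs st.1 st.2 pre.length := by
  induction xs generalizing pre st with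
  | nil => simp [PySem.List.pyRange_one_eq_nil, pvARun]
  | cons x t ih =>
    have hlt : (pre.length : Int) < ((pre ++ (x :: t)).length : Int) := by
      simp
    rw [PySem.List.pyRange_one_cons hlt]
    have hget : PySem.List.pyGetD (pre ++ x :: t) (pre.length : Int) 0 = x := by
      rw [PySem.List.pyGetD_natCast]
      simp [List.getD]
    have hre : pre ++ x :: t = (pre ++ [x]) ++ t := by simp
    have hlen : ((pre ++ [x]).length : Int) = (pre.length : Int) + 1 := by simp
    simp only [List.foldl_cons, hget]
    by_cases hc : st.1 ≤ x
    · have := ih (pre ++ [x]) (x, (pre.length : Int))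
      rw [hlen] at this
      rw [hre, if_pos hc, this]
      simp [pvARun, hc]
    · have := ih (pre ++ [x]) st
      rw [hlen] at this
      rw [if_neg hc, hre, this]
      simp [pvARun, hc]

-- B's step on an already-seen best, on matching elements only
def pvBInner (st : Option Int × Option Int × Int) (x : Int) : Option Int × Option Int × Int :=
  match st with
  | (none, _, count) => (some x, some count, count + 1)
  | (some b, bidx, count) =>
    if b ≤ x then (some x, some count, count + 1) else (some b, bidx, count + 1)

theorem pv_brun_eq (xs : List Int) (m j c : Int) :
    xs.foldl pvBInner (some m, some j, c)
      = (some (pvARun xs m j c).1, some (pvARun xs m j c).2, c + xs.length) := by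
  induction xs generalizing m j c with
  | nil => simp [pvARun]
  | cons x t ih =>
    simp only [List.foldl_cons, pvBInner, pvARun]
    by_cases hc : m ≤ x
    · simp only [if_pos hc, ih]
      simp; omega
    · simp only [if_neg hc, ih]
      simp; omega

theorem pv_bstep_eq (want : Int) :
    pvBStep want = fun st x => if (PySem.Int.mod x 2 == want) = true then pvBInner st x else st := by
  funext st x
  simp [pvBStep, pvBInner]

-- the whole B computation on a nonempty filtered list
theorem pv_b_filtered (h : Int) (t : List Int) :
    ((h :: t).foldl pvBInner (none, none, 0)).2.1 = some (pvARun t h 0 1).2 := by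
  simp only [List.foldl_cons, pvBInner, pv_brun_eq]
  norm_num

-- the filtered list both sides reduce to, for command "odd"
theorem pv_filter_odd (arr : List Int) :
    arr.filter (fun x => x % 2 == 1)
      = arr.filter (fun x => !((x % 2 : Int) == 0)) := by
  apply List.filter_congr
  intro x _
  have h := Int.emod_two_eq x
  rcases h with h | h <;> simp [h]

-- ===== VERDICT (by name: the statement is the Claim_ definition above) =====
theorem max_even_odd_spec : Claim_equal_max_even_odd := by
  intro command arr _ hpre
  unfold Spec_max_even_odd max_even_odd max_even_odd_alt
  simp only []
  rw [PySem.List.foldl_pyRange_zero_pyGetD' arr 0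
    (fun (st : List Int × List Int) x =>
      if PySem.Int.mod x 2 == 0 then (st.1 ++ [x], st.2) else (st.1, st.2 ++ [x]))
    ([], [])]
  rw [pv_classify (fun x => PySem.Int.mod x 2 == 0) arr [] []]
  by_cases hodd : command = "odd"
  · -- odd branch
    obtain ⟨x, hx, hx1⟩ := hpre.1 hodd
    rw [pv_mod2] at hx1
    have hne : arr.filter (fun x => !(PySem.Int.mod x 2 == 0)) ≠ [] := by
      intro hnil
      have : x ∈ arr.filter (fun x => !(PySem.Int.mod x 2 == 0)) := by
        simp [List.mem_filter, hx, hx1]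
      rw [hnil] at this
      simp at this
    obtain ⟨h, t, hft⟩ := List.exists_cons_of_ne_nil hne
    simp only [hodd, hft]
    norm_num
    rw [if_neg (by decide : ¬("odd" : String) = "even")]
    rw [(by simp [List.idxOf?_cons] : (List.idxOf? h (h :: t)).getD 0 = 0)]
    rw [pv_bstep_eq]
    rw [PySem.List.foldl_if_eq_foldl_filter (fun x => PySem.Int.mod x 2 == (1:Int)) pvBInner]
    norm_num
    simp only [pv_mod2] at hft
    rw [pv_filter_odd, hft, pv_b_filtered]
    have := pv_aloop_eq t [h] (h, ((0:Nat) : Int))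
    simp only [List.cons_append, List.nil_append, List.length_cons, List.length_nil] at this
    unfold pvALoop
    norm_num at this ⊢
    rw [this]
  · by_cases heven : command = "even"
    · obtain ⟨x, hx, hx0⟩ := hpre.2 heven
      rw [pv_mod2] at hx0
      have hne : arr.filter (fun x => PySem.Int.mod x 2 == 0) ≠ [] := by
        intro hnil
        have : x ∈ arr.filter (fun x => PySem.Int.mod x 2 == 0) := by
          simp [List.mem_filter, hx, hx0]
        rw [hnil] at this
        simp at this
      obtain ⟨h, t, hft⟩ := List.exists_cons_of_ne_nil hne
      simp only [heven, hft]
      norm_num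
      rw [(by simp [List.idxOf?_cons] : (List.idxOf? h (h :: t)).getD 0 = 0)]
      rw [if_neg (by decide : ¬("even" : String) = "odd")]
      rw [pv_bstep_eq]
      rw [PySem.List.foldl_if_eq_foldl_filter (fun x => PySem.Int.mod x 2 == (0:Int)) pvBInner]
      norm_num
      simp only [pv_mod2] at hft
      rw [hft, pv_b_filtered]
      have := pv_aloop_eq t [h] (h, ((0:Nat) : Int))
      simp only [List.cons_append, List.nil_append, List.length_cons, List.length_nil] at this
      unfold pvALoop
      norm_num at this ⊢
      rw [this]
    · simp [hodd, heven]
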